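-- pv_equiv track=rewrite | github.com/EvgenyBelichkov/EPAM_HW | homework7/task03/tic_tac_toe.py | checking_function
-- ===== SOURCE A (Python) =====
-- def checking_function(horizontal_lines):
--     result = None
--     for i in horizontal_lines:
--         if "-" in i:
--             result = "unfinished!"
--             continue
--         elif i[0] == i[1] == i[2] == i[3]:
--             return i[0] + " wins!"
--         elif result is None:
--             result = "draw!"
--     return result
-- ===== SOURCE B (Python) =====
-- def checking_function(horizontal_lines):
--     # Two phases instead of one accumulator pass.
--     for line in horizontal_lines:
--         if "-" not in line and line[0] == line[1] == line[2] == line[3]: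
--             return line[0] + " wins!"
--     if any("-" in line for line in horizontal_lines):
--         return "unfinished!"
--     return "draw!" if horizontal_lines else None
-- ===== Notes on version B (the rewrite author's own statement) =====
-- stated objective: simpler
-- what changed: Replaces A's single pass with a mutated result accumulator by two phases: a direct scan returning the first winning line, then a dash membership check over the whole list to pick unfinished!/draw!/None.
-- outside the precondition, e.g. on checking_function(['aaaa', '']): A returns 'a wins!', B returns 'a wins!'
import Mathlib
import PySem

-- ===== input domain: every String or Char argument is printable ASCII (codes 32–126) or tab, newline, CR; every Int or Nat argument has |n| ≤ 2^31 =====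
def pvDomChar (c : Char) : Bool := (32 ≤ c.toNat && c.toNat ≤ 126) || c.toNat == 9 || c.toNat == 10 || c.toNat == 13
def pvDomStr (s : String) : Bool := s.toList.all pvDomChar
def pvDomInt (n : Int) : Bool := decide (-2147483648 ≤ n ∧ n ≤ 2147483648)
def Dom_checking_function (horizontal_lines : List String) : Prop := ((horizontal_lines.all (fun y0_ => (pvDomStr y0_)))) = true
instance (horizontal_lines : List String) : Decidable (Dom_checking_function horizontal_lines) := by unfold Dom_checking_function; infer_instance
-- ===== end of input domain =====

-- B replaces A's one-pass result accumulator by two phases (winner scan, then a dash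
-- membership check); objective: simpler. Equivalence is of return values on Pre_.

-- shared transliteration of the Python chain 'i[0] == i[1] == i[2] == i[3]' (it appears
-- verbatim in both sources), with Python's short-circuit evaluation:
-- some (some a) = chain is True (a = i[0]); some none = chain is False; none = IndexError.
def pvChain (i : String) : Option (Option Char) :=
  match PySem.Str.pyGet? i 0 with
  | none => none
  | some a =>
    match PySem.Str.pyGet? i 1 with
    | none => none
    | some b =>
      if a = b then
        match PySem.Str.pyGet? i 2 with
        | none => none
        | some c =>
          if b = c then
            match PySem.Str.pyGet? i 3 with
            | none => none
            | some d => if c = d then some (some a) else some none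
          else some none
      else some none

-- ===== PORT A =====
-- A's single loop carrying the 'result' accumulator.
def pvA_loop : List String → Option String → Option String
  | [], result => result
  | i :: rest, result =>
    if PySem.Str.isIn "-" i then pvA_loop rest (some "unfinished!")
    else
      match pvChain i with
      | none => none                    -- Python raises IndexError here (outside Pre_)
      | some (some a) => some (String.mk [a] ++ " wins!")
      | some none =>
        if result = none then pvA_loop rest (some "draw!") else pvA_loop rest result

def checking_function (horizontal_lines : List String) : Option String :=
  pvA_loop horizontal_lines none

-- ===== PORT B =====
-- phase one: scan for the first winning line.
-- some (some a) = winner found; some none = no winner; none = IndexError (outside Pre_).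
def pvB_findWinner : List String → Option (Option Char)
  | [] => some none
  | line :: rest =>
    if ¬ PySem.Str.isIn "-" line then
      match pvChain line with
      | none => none                    -- Python raises IndexError here (outside Pre_)
      | some (some a) => some (some a)
      | some none => pvB_findWinner rest
    else pvB_findWinner rest

def checking_function_alt (horizontal_lines : List String) : Option String :=
  match pvB_findWinner horizontal_lines with
  | none => none                        -- Python raises IndexError here (outside Pre_)
  | some (some a) => some (String.mk [a] ++ " wins!")
  | some none =>
    if horizontal_lines.any (fun line => PySem.Str.isIn "-" line) then some "unfinished!"
    else if horizontal_lines.isEmpty then none else some "draw!"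

-- ===== PRECONDITION & SPEC =====
-- A (and B) raise IndexError on a dash-free line shorter than 4 whose comparison chain
-- does not short-circuit to False first; Pre_ excludes every input containing such a
-- line. It is slightly narrower than A's return domain: when a winning line precedes
-- the offending line A still returns (and B returns the same value) — see cites.
def pvLineSafe (s : String) : Bool :=
  PySem.Str.isIn "-" s ||
  decide (4 ≤ s.toList.length) ||
  (decide (2 ≤ s.toList.length) && decide (s.toList[0]? ≠ s.toList[1]?)) ||
  (decide (3 ≤ s.toList.length) && decide (s.toList[1]? ≠ s.toList[2]?))

def Pre_checking_function (horizontal_lines : List String) : Prop :=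
  ∀ s ∈ horizontal_lines, pvLineSafe s = true

instance (horizontal_lines : List String) : Decidable (Pre_checking_function horizontal_lines) := by
  unfold Pre_checking_function; infer_instance

def pvWitness_checking_function : List String := ["x-oo", "xooo", "xxxx"]

def Spec_checking_function (horizontal_lines : List String) (out : Option String) : Prop :=
  out = checking_function_alt horizontal_lines

instance (horizontal_lines : List String) (out : Option String) : Decidable (Spec_checking_function horizontal_lines out) := by
  unfold Spec_checking_function; infer_instance

-- ===== CLAIM (what is proved, stated in full; the proofs are below) =====
def Claim_equal_checking_function : Prop := ∀ (horizontal_lines : List String), Dom_checking_function horizontal_lines → Pre_checking_function horizontal_lines → Spec_checking_function horizontal_lines (checking_function horizontal_lines)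

-- ===== LEMMAS AND PROOFS =====

-- a safe dash-free line never hits the IndexError branch of the chain
theorem pvChain_ne_none (s : String) (hs : pvLineSafe s = true)
    (hd : PySem.Str.isIn "-" s = false) : pvChain s ≠ none := by
  unfold pvChain pvLineSafe at *
  rw [hd] at hs
  simp only [PySem.Str.pyGet?_eq, PySem.Chars.pyGet?] at *
  rcases hl : s.toList with _ | ⟨a, _ | ⟨b, _ | ⟨c, _ | ⟨d, t⟩⟩⟩⟩ <;>
    simp_all [PySem.List.pyGet?, PySem.List.pyIdx?]
  · rcases hs with h | h <;> split_ifs <;> simp_all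
  · have h0 : ((0:Int) ≤ ↑t.length + 1 + 1 + 1) := by omega
    have h1 : ((0:Int) ≤ ↑t.length + 1 + 1) := by omega
    have h2 : ((2:Int) ≤ ↑t.length + 1 + 1 + 1) := by omega
    have h3 : ((3:Int) ≤ ↑t.length + 1 + 1 + 1) := by omega
    rw [if_pos h0, if_pos h1, if_pos h2, if_pos h3]
    simp only [Option.bind]
    simp
    split_ifs <;> simp

-- main invariant relating A's accumulator loop to B's two phases
theorem pvA_loop_eq (hl : List String) (r : Option String)
    (hpre : ∀ s ∈ hl, pvLineSafe s = true)
    (hr : r = none ∨ r = some "draw!" ∨ r = some "unfinished!") :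
    pvA_loop hl r =
      match pvB_findWinner hl with
      | none => none
      | some (some a) => some (String.mk [a] ++ " wins!")
      | some none =>
        if hl.any (fun line => PySem.Str.isIn "-" line) then some "unfinished!"
        else if hl.isEmpty then r
        else if r = some "unfinished!" then some "unfinished!" else some "draw!" := by
  induction hl generalizing r with
  | nil => simp [pvA_loop, pvB_findWinner]
  | cons i rest ih =>
    have hpre' : ∀ s ∈ rest, pvLineSafe s = true := fun s hs => hpre s (List.mem_cons_of_mem _ hs)
    by_cases hdash : PySem.Chars.isIn ['-'] i.toList = true
    · rw [show pvA_loop (i :: rest) r = pvA_loop rest (some "unfinished!") by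
        simp [pvA_loop, hdash]]
      rw [ih (some "unfinished!") hpre' (Or.inr (Or.inr rfl))]
      rw [show pvB_findWinner (i :: rest) = pvB_findWinner rest by
        simp [pvB_findWinner, hdash]]
      cases pvB_findWinner rest with
      | none => rfl
      | some w =>
        cases w with
        | some a => rfl
        | none => split_ifs <;> simp_all
    · have hdf : PySem.Str.isIn "-" i = false := by simpa using hdash
      have hne := pvChain_ne_none i (hpre i (List.mem_cons_self)) hdf
      have hdfc : PySem.Chars.isIn ['-'] i.toList = false := by simpa using hdash
      cases hc : pvChain i with
      | none => exact absurd hc hne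
      | some w =>
        cases w with
        | some a => simp [pvA_loop, pvB_findWinner, hdfc, hc]
        | none =>
          rw [show pvA_loop (i :: rest) r
                = if r = none then pvA_loop rest (some "draw!") else pvA_loop rest r by
              simp [pvA_loop, hdfc, hc]]
          rw [show pvB_findWinner (i :: rest) = pvB_findWinner rest by
              simp [pvB_findWinner, hdfc, hc]]
          have hany : ((i :: rest).any fun line => PySem.Str.isIn "-" line)
              = (rest.any fun line => PySem.Str.isIn "-" line) := by simp [hdfc]
          simp only [hany, List.isEmpty_cons]
          rcases hr with hr | hr | hr <;> subst hr <;>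
            [rw [if_pos rfl, ih (some "draw!") hpre' (Or.inr (Or.inl rfl))];
             rw [if_neg (by simp), ih (some "draw!") hpre' (Or.inr (Or.inl rfl))];
             rw [if_neg (by simp), ih (some "unfinished!") hpre' (Or.inr (Or.inr rfl))]] <;>
          · cases pvB_findWinner rest with
            | none => rfl
            | some w =>
              cases w with
              | some a => rfl
              | none => split_ifs <;> simp_all

-- ===== VERDICT (by name: the statement is the Claim_ definition above) =====
theorem checking_function_spec : Claim_equal_checking_function := by
  intro hl _ hpre
  unfold Spec_checking_function checking_function checking_function_alt
  rw [pvA_loop_eq hl none hpre (Or.inl rfl)]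
  cases h : pvB_findWinner hl with
  | none => rfl
  | some w =>
    cases w with
    | none => simp
    | some a => rfl
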